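-- pv_equiv track=rewrite | github.com/wjs2063/Python-Coding-test- | Kakao/카카오1번(2021).py | solution
-- ===== SOURCE A (Python) =====
-- from collections import defaultdict
--
-- def solution(id_list,report,k):
--     candidate=dict()
--     banned=defaultdict(int)
--     my=defaultdict(list)
--     repeat=set()
--     result=[]
--     for name in report:
--         user,ban_id=name.split()
--         if name not in repeat:
--             repeat.add(name)
--             banned[ban_id]+=1
--             my[user].append(ban_id)
--     for name in id_list:
--
--         cnt=0
--         # my[user]에 담긴 id 들중 ban 당한횟수
--         for id in my[name]:
--             if banned[id]>=k:
--                 cnt+=1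
--         result.append(cnt)
--     return result
-- ===== SOURCE B (Python) =====
-- def solution(id_list, report, k):
--     # Invert the traversal: index each reported target by the set of its reporters,
--     # then count, for each id, the targets it reported whose reporter count meets k.
--     reporters = {}  # target -> set of users who reported it
--     seen = set()
--     for line in report:
--         if line not in seen:
--             seen.add(line)
--             user, target = line.split()
--             if target not in reporters:
--                 reporters[target] = set()
--             reporters[target].add(user)
--     return [sum(1 for reps in reporters.values() if name in reps and len(reps) >= k)
--             for name in id_list]
-- ===== Notes on version B (the rewrite author's own statement) =====
-- stated objective: alternative
-- what changed: B inverts A's reporter-to-targets traversal: it builds one target-to-reporter-set index and answers each id by counting indexed targets whose reporter set contains the id and meets the threshold, instead of A's per-user target lists rechecked against a separate ban counter.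
-- outside the precondition, e.g. on solution(['a'], ['a b', 'a  b'], 1): A returns [2], B returns [1]; on solution(['a'], ['a'], 1): A raises ValueError, B raises ValueError
import Mathlib
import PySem

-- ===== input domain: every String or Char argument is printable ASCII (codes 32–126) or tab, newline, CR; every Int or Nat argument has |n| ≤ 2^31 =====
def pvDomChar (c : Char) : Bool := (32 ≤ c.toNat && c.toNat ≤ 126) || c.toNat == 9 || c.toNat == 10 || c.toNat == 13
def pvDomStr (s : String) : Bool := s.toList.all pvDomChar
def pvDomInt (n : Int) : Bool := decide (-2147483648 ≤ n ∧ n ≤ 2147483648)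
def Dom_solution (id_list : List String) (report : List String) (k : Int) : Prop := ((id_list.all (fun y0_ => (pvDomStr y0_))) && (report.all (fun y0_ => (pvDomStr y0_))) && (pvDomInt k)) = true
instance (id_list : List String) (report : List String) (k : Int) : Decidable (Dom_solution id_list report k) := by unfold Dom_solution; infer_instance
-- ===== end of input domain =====

-- B inverts A's traversal: one target→reporter-set index replaces A's per-user target
-- lists plus ban counter; same results, similar cost (objective: alternative).

-- ===== PORT A =====
-- state: (repeat, banned, my) as in A
def solnStepA (st : PySem.Set String × PySem.Dict String Int × PySem.Dict String (List String))
    (name : String) :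
    PySem.Set String × PySem.Dict String Int × PySem.Dict String (List String) :=
  match PySem.Str.split₀ name with
  | [user, ban_id] =>
    if PySem.Set.contains st.1 name then st
    else (PySem.Set.add st.1 name,
          st.2.1.modify ban_id 0 (· + 1),
          st.2.2.modify user [] (· ++ [ban_id]))
  | _ => st  -- here Python raises ValueError (unpacking); excluded by Pre_solution

def solution (id_list : List String) (report : List String) (k : Int) : List Int :=
  let st := report.foldl solnStepA (PySem.Set.empty, PySem.Dict.empty, PySem.Dict.empty)
  id_list.foldl (fun result name =>
    result ++ [(st.2.2.getD name []).foldl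
      (fun cnt id => if k ≤ st.2.1.getD id 0 then cnt + 1 else cnt) (0 : Int)]) []

-- ===== PORT B =====
-- state: (reporters, seen) as in B
def solnStepB (st : PySem.Dict String (PySem.Set String) × PySem.Set String)
    (line : String) : PySem.Dict String (PySem.Set String) × PySem.Set String :=
  if PySem.Set.contains st.2 line then st
  else
    let seen := PySem.Set.add st.2 line
    match PySem.Str.split₀ line with
    | [user, target] =>
      (st.1.modify target PySem.Set.empty (fun s => PySem.Set.add s user), seen)
    | _ => (st.1, seen)  -- here Python raises ValueError (unpacking); excluded by Pre_solution

def solution_alt (id_list : List String) (report : List String) (k : Int) : List Int :=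
  let reporters := (report.foldl solnStepB (PySem.Dict.empty, PySem.Set.empty)).1
  id_list.map (fun name =>
    reporters.values.foldl
      (fun cnt reps =>
        if PySem.Set.contains reps name && decide (k ≤ PySem.Set.len reps)
        then cnt + 1 else cnt) (0 : Int))

-- ===== PRECONDITION & SPEC =====
-- Pre_ excludes reports with an entry that does not split into exactly two
-- whitespace-separated tokens (A raises ValueError there), and reports containing two
-- DISTINCT strings that split to the same (reporter, target) pair (e.g. "a b" and
-- "a  b"), a corner where counting them as two reports (A) or as one (B) are both
-- defensible readings of the deduplication rule.
def Pre_solution (id_list : List String) (report : List String) (k : Int) : Prop :=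
  (∀ s ∈ report, (PySem.Str.split₀ s).length = 2) ∧
  (∀ s ∈ report, ∀ t ∈ report, PySem.Str.split₀ s = PySem.Str.split₀ t → s = t)
instance (id_list : List String) (report : List String) (k : Int) : Decidable (Pre_solution id_list report k) := by unfold Pre_solution; infer_instance

def pvWitness_solution : List String × List String × Int :=
  (["muzi", "frodo", "apeach", "neo"],
   ["muzi frodo", "apeach frodo", "frodo neo", "muzi neo", "apeach muzi"], 2)

def Spec_solution (id_list : List String) (report : List String) (k : Int) (out : List Int) : Prop := out = solution_alt id_list report k
instance (id_list : List String) (report : List String) (k : Int) (out : List Int) : Decidable (Spec_solution id_list report k out) := by unfold Spec_solution; infer_instance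

-- ===== CLAIM (what is proved, stated in full; the proofs are below) =====
def Claim_equal_solution : Prop := ∀ (id_list : List String) (report : List String) (k : Int), Dom_solution id_list report k → Pre_solution id_list report k → Spec_solution id_list report k (solution id_list report k)

-- ===== LEMMAS AND PROOFS =====

def toPair (s : String) : String × String :=
  match PySem.Str.split₀ s with
  | [u, t] => (u, t)
  | _ => ("", "")

theorem toPair_eq {s u t : String} (h : PySem.Str.split₀ s = [u, t]) : toPair s = (u, t) := by
  simp [toPair, h]

-- the sub-list of l whose elements are NEW w.r.t. seen (first occurrences only)
def newLines (seen : PySem.Set String) : List String → List String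
  | [] => []
  | x :: xs =>
    if PySem.Set.contains seen x then newLines seen xs
    else x :: newLines (PySem.Set.add seen x) xs

theorem mem_newLines (l : List String) (seen : PySem.Set String) (y : String) :
    y ∈ newLines seen l ↔ y ∈ l ∧ y ∉ seen := by
  induction l generalizing seen with
  | nil => simp [newLines]
  | cons x xs ih =>
    by_cases hc : PySem.Set.contains seen x = true
    · have hx : x ∈ seen := (PySem.Set.contains_iff seen x).mp hc
      simp only [newLines, if_pos hc, ih, List.mem_cons]
      constructor
      · rintro ⟨hy, hns⟩; exact ⟨Or.inr hy, hns⟩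
      · rintro ⟨hy | hy, hns⟩
        · exact absurd (hy ▸ hx) hns
        · exact ⟨hy, hns⟩
    · have hx : x ∉ seen := fun h => hc ((PySem.Set.contains_iff seen x).mpr h)
      simp only [newLines, if_neg hc, List.mem_cons, ih, PySem.Set.mem_add]
      constructor
      · rintro (rfl | ⟨hy, hns⟩)
        · exact ⟨Or.inl rfl, hx⟩
        · exact ⟨Or.inr hy, fun h => hns (Or.inl h)⟩
      · rintro ⟨rfl | hy, hns⟩
        · exact Or.inl rfl
        · by_cases hyx : y = x
          · exact Or.inl hyx
          · exact Or.inr ⟨hy, fun h => h.elim hns hyx⟩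

theorem nodup_newLines (l : List String) (seen : PySem.Set String) :
    (newLines seen l).Nodup := by
  induction l generalizing seen with
  | nil => simp [newLines]
  | cons x xs ih =>
    by_cases hx : x ∈ seen
    · simpa [newLines, hx] using ih seen
    · have hnew : newLines seen (x :: xs) = x :: newLines (PySem.Set.add seen x) xs := by
        simp [newLines, hx]
      rw [hnew]
      refine List.nodup_cons.mpr ⟨?_, ih _⟩
      intro hmem
      exact ((mem_newLines xs _ x).mp hmem).2 ((PySem.Set.mem_add seen x x).mpr (Or.inr rfl))

theorem mem_newLines_sub (l : List String) (seen : PySem.Set String) {y : String}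
    (h : y ∈ newLines seen l) : y ∈ l := ((mem_newLines l seen y).mp h).1

theorem foldA (l : List String) (h2 : ∀ s ∈ l, (PySem.Str.split₀ s).length = 2)
    (seen : PySem.Set String) (b : PySem.Dict String Int) (m : PySem.Dict String (List String)) :
    l.foldl solnStepA (seen, b, m) =
      (PySem.Set.update seen l,
       ((newLines seen l).map toPair).foldl (fun d p => d.modify p.2 0 (· + 1)) b,
       ((newLines seen l).map toPair).foldl (fun d p => d.modify p.1 [] (· ++ [p.2])) m) := by
  induction l generalizing seen b m with
  | nil => simp [newLines, PySem.Set.update]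
  | cons x xs ih =>
    obtain ⟨u, t, hsplit⟩ := List.length_eq_two.mp (h2 x (by simp))
    have h2' : ∀ s ∈ xs, (PySem.Str.split₀ s).length = 2 := fun s hs => h2 s (by simp [hs])
    by_cases hx : x ∈ seen
    · have hstep : solnStepA (seen, b, m) x = (seen, b, m) := by
        simp [solnStepA, hsplit, hx]
      have hnew : newLines seen (x :: xs) = newLines seen xs := by simp [newLines, hx]
      have hadd : PySem.Set.add seen x = seen := by simp [PySem.Set.add, hx]
      have hupd : PySem.Set.update seen (x :: xs) = PySem.Set.update seen xs := by
        simp [PySem.Set.update, hadd]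
      rw [List.foldl_cons, hstep, ih h2', hnew, hupd]
    · have hstep : solnStepA (seen, b, m) x =
          (PySem.Set.add seen x, b.modify t 0 (· + 1), m.modify u [] (· ++ [t])) := by
        simp [solnStepA, hsplit, hx]
      have hnew : newLines seen (x :: xs) = x :: newLines (PySem.Set.add seen x) xs := by
        simp [newLines, hx]
      have hupd : PySem.Set.update seen (x :: xs) = PySem.Set.update (PySem.Set.add seen x) xs := by
        simp [PySem.Set.update]
      rw [List.foldl_cons, hstep, ih h2', hnew, hupd]
      simp only [List.map_cons, toPair_eq hsplit, List.foldl_cons]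

theorem foldB (l : List String) (h2 : ∀ s ∈ l, (PySem.Str.split₀ s).length = 2)
    (d : PySem.Dict String (PySem.Set String)) (seen : PySem.Set String) :
    l.foldl solnStepB (d, seen) =
      (((newLines seen l).map toPair).foldl
        (fun d p => d.modify p.2 PySem.Set.empty (fun s => PySem.Set.add s p.1)) d,
       PySem.Set.update seen l) := by
  induction l generalizing seen d with
  | nil => simp [newLines, PySem.Set.update]
  | cons x xs ih =>
    obtain ⟨u, t, hsplit⟩ := List.length_eq_two.mp (h2 x (by simp))
    have h2' : ∀ s ∈ xs, (PySem.Str.split₀ s).length = 2 := fun s hs => h2 s (by simp [hs])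
    by_cases hx : x ∈ seen
    · have hstep : solnStepB (d, seen) x = (d, seen) := by simp [solnStepB, hx]
      have hnew : newLines seen (x :: xs) = newLines seen xs := by simp [newLines, hx]
      have hadd : PySem.Set.add seen x = seen := by simp [PySem.Set.add, hx]
      have hupd : PySem.Set.update seen (x :: xs) = PySem.Set.update seen xs := by
        simp [PySem.Set.update, hadd]
      rw [List.foldl_cons, hstep, ih h2', hnew, hupd]
    · have hstep : solnStepB (d, seen) x =
          (d.modify t PySem.Set.empty (fun s => PySem.Set.add s u), PySem.Set.add seen x) := by
        simp [solnStepB, hsplit, hx]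
      have hnew : newLines seen (x :: xs) = x :: newLines (PySem.Set.add seen x) xs := by
        simp [newLines, hx]
      have hupd : PySem.Set.update seen (x :: xs) = PySem.Set.update (PySem.Set.add seen x) xs := by
        simp [PySem.Set.update]
      rw [List.foldl_cons, hstep, ih h2', hnew, hupd]
      simp only [List.map_cons, toPair_eq hsplit, List.foldl_cons]

theorem getD_groupby (l : List (String × String)) (d : PySem.Dict String (PySem.Set String))
    (t : String) :
    (l.foldl (fun d p => d.modify p.2 PySem.Set.empty (fun s => PySem.Set.add s p.1)) d).getD t
        PySem.Set.empty
      = (l.filter (fun p => p.2 == t)).foldl (fun s p => PySem.Set.add s p.1)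
          (d.getD t PySem.Set.empty) := by
  induction l generalizing d with
  | nil => rfl
  | cons p l ih =>
    rw [List.foldl_cons, ih, List.filter_cons, PySem.Dict.getD_modify]
    by_cases h : t = p.2
    · subst h
      simp
    · have hbe : (p.2 == t) = false := beq_eq_false_iff_ne.mpr fun he => h he.symm
      rw [if_neg h, hbe]
      simp

theorem mem_us (P : List (String × String)) (t y : String) :
    y ∈ (P.filter (fun p => p.2 == t)).map (fun p => p.1) ↔ (y, t) ∈ P := by
  constructor
  · intro h
    obtain ⟨p, hp, rfl⟩ := List.mem_map.mp h
    obtain ⟨hpP, hpt⟩ := List.mem_filter.mp hp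
    obtain ⟨a, b⟩ := p
    have hb : b = t := by simpa using hpt
    subst hb; exact hpP
  · intro h
    exact List.mem_map.mpr ⟨(y, t), List.mem_filter.mpr ⟨h, by simp⟩, rfl⟩

theorem mem_ms (P : List (String × String)) (name t : String) :
    t ∈ (P.filter (fun p => p.1 == name)).map (fun p => p.2) ↔ (name, t) ∈ P := by
  constructor
  · intro h
    obtain ⟨p, hp, rfl⟩ := List.mem_map.mp h
    obtain ⟨hpP, hpt⟩ := List.mem_filter.mp hp
    obtain ⟨a, b⟩ := p
    have ha : a = name := by simpa using hpt
    subst ha; exact hpP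
  · intro h
    exact List.mem_map.mpr ⟨(name, t), List.mem_filter.mpr ⟨h, by simp⟩, rfl⟩

theorem nodup_us (P : List (String × String)) (hP : P.Nodup) (t : String) :
    ((P.filter (fun p => p.2 == t)).map (fun p => p.1)).Nodup := by
  refine List.Nodup.map_on ?_ (hP.filter _)
  intro p hp q hq hpq
  have h1 : p.2 = t := by simpa using (List.mem_filter.mp hp).2
  have h2 : q.2 = t := by simpa using (List.mem_filter.mp hq).2
  obtain ⟨a, b⟩ := p; obtain ⟨c, d⟩ := q
  simp_all

theorem nodup_ms (P : List (String × String)) (hP : P.Nodup) (name : String) :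
    ((P.filter (fun p => p.1 == name)).map (fun p => p.2)).Nodup := by
  refine List.Nodup.map_on ?_ (hP.filter _)
  intro p hp q hq hpq
  have h1 : p.1 = name := by simpa using (List.mem_filter.mp hp).2
  have h2 : q.1 = name := by simpa using (List.mem_filter.mp hq).2
  obtain ⟨a, b⟩ := p; obtain ⟨c, d⟩ := q
  simp_all

theorem count_targets (P : List (String × String)) (t : String) :
    (P.map (fun p => p.2)).count t = (P.filter (fun p => p.2 == t)).length := by
  rw [List.count_eq_countP, List.countP_map, List.countP_eq_length_filter]
  rfl

theorem count_eq (P : List (String × String)) (hP : P.Nodup) (k : Int) (name : String) :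
    ((P.filter (fun p => p.1 == name)).map (fun p => p.2)).countP
        (fun t => decide (k ≤ ((P.map (fun p => p.2)).count t : Int)))
    = (PySem.Set.ofList (P.map (fun p => p.2))).countP
        (fun t => PySem.Set.contains ((P.filter (fun p => p.2 == t)).map (fun p => p.1)) name
           && decide (k ≤ PySem.Set.len ((P.filter (fun p => p.2 == t)).map (fun p => p.1)))) := by
  rw [List.countP_eq_length_filter, List.countP_eq_length_filter]
  apply List.Perm.length_eq
  rw [List.perm_ext_iff_of_nodup (List.Nodup.filter _ (nodup_ms P hP name))
    (List.Nodup.filter _ (PySem.Set.nodup_ofList _))]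
  intro t
  simp only [List.mem_filter, mem_ms, PySem.Set.mem_ofList, decide_eq_true_eq,
    Bool.and_eq_true, PySem.Set.contains_iff, mem_us, count_targets]
  constructor
  · rintro ⟨hmem, hk⟩
    refine ⟨List.mem_map.mpr ⟨(name, t), hmem, rfl⟩, hmem, ?_⟩
    simpa [PySem.Set.len] using hk
  · rintro ⟨_, hmem, hk⟩
    refine ⟨hmem, ?_⟩
    simpa [PySem.Set.len] using hk

theorem groupfold_getD (P : List (String × String)) (hP : P.Nodup) (t : String) :
    (P.foldl (fun d p => d.modify p.2 PySem.Set.empty (fun s => PySem.Set.add s p.1))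
        PySem.Dict.empty).getD t PySem.Set.empty
      = (P.filter (fun p => p.2 == t)).map (fun p => p.1) := by
  rw [getD_groupby, PySem.Dict.getD_empty]
  have h1 : (P.filter (fun p => p.2 == t)).foldl (fun s p => PySem.Set.add s p.1)
      PySem.Set.empty
      = ((P.filter (fun p => p.2 == t)).map (fun p => p.1)).foldl PySem.Set.add [] := by
    rw [List.foldl_map]; rfl
  rw [h1, ← PySem.Set.ofList_eq_foldl,
    PySem.Set.ofList_eq_self_of_nodup _ (nodup_us P hP t)]

theorem bannedD (P : List (String × String)) (id : String) :
    (P.foldl (fun d p => d.modify p.2 0 (· + 1)) PySem.Dict.empty).getD id 0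
      = ((P.map (fun p => p.2)).count id : Int) := by
  have h1 : P.foldl (fun d p => d.modify p.2 0 (· + 1))
        (PySem.Dict.empty : PySem.Dict String Int)
      = (P.map (fun p => p.2)).foldl (fun d x => d.modify x 0 (· + 1))
        (PySem.Dict.empty : PySem.Dict String Int) := by
    rw [List.foldl_map]
  conv_lhs => rw [h1]
  rw [PySem.Dict.getD_foldl_modify_add_one, PySem.Dict.getD_empty, zero_add]

-- ===== VERDICT (by name: the statement is the Claim_ definition above) =====
theorem solution_spec : Claim_equal_solution := by
  intro id_list report k hdom hpre
  obtain ⟨h2, hinj⟩ := hpre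
  unfold Spec_solution solution solution_alt
  simp only []
  rw [foldA report h2, foldB report h2]
  have hPnodup : ((newLines PySem.Set.empty report).map toPair).Nodup := by
    refine List.Nodup.map_on ?_ (nodup_newLines report PySem.Set.empty)
    intro x hx y hy hxy
    obtain ⟨u, t, hsx⟩ := List.length_eq_two.mp (h2 x (mem_newLines_sub _ _ hx))
    obtain ⟨u', t', hsy⟩ := List.length_eq_two.mp (h2 y (mem_newLines_sub _ _ hy))
    rw [toPair_eq hsx, toPair_eq hsy] at hxy
    obtain ⟨hu, ht⟩ := Prod.mk.injEq u t u' t' ▸ hxy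
    exact hinj x (mem_newLines_sub _ _ hx) y (mem_newLines_sub _ _ hy)
      (by rw [hsx, hsy, hu, ht])
  set P := (newLines PySem.Set.empty report).map toPair with hPdef
  rw [PySem.List.foldl_append_singleton_eq_map, List.nil_append]
  apply List.map_congr_left
  intro name _
  -- A side
  rw [PySem.Dict.getD_foldl_modify_append]
  simp only [PySem.Dict.getD_empty, List.nil_append, bannedD]
  rw [PySem.List.foldl_ite_add_one (fun t => k ≤ ((P.map (fun p => p.2)).count t : Int))]
  -- B side
  have hkeysnodup : ((P.foldl
      (fun d p => d.modify p.2 PySem.Set.empty (fun s => PySem.Set.add s p.1))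
      PySem.Dict.empty).keys).Nodup := by
    apply PySem.Dict.nodup_keys_foldl_modify_key
    simp [PySem.Dict.keys_empty]
  rw [PySem.Dict.values_eq_map_keys _ hkeysnodup PySem.Set.empty,
    PySem.Dict.keys_foldl_modify_key, PySem.Dict.keys_empty, PySem.Set.update_nil_left]
  simp only [groupfold_getD P hPnodup]
  rw [PySem.List.foldl_if_add_one]
  conv_rhs => rw [List.countP_map]
  simp only [zero_add]
  exact congrArg Nat.cast (count_eq P hPnodup k name)
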